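-- pv_equiv track=rewrite | github.com/farzinlize/AKAGI | misc.py | extract_from_fasta
-- ===== SOURCE A (Python) =====
-- def extract_from_fasta(fasta, dataset):
--     read = False
--     binding_sites = []
--     for line in fasta:
--         if dataset in line:
--             read = True
--         elif read:
--             if '>' in line:
--                 if 'instances' in line:
--                     continue
--                 return binding_sites
--             else:
--                 binding_sites += [line]
--     return binding_sites
-- ===== SOURCE B (Python) =====
-- def extract_from_fasta(fasta, dataset):
--     start = next((i for i, line in enumerate(fasta) if dataset in line), None)
--     if start is None:
--         return []
--     tail = fasta[start + 1:]
--     stop = next((j for j, line in enumerate(tail)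
--                  if '>' in line and dataset not in line and 'instances' not in line),
--                 len(tail))
--     return [line for line in tail[:stop]
--             if dataset not in line and '>' not in line]
-- ===== Notes on version B (the rewrite author's own statement) =====
-- stated objective: alternative
-- what changed: Replaces A's line-by-line boolean-flag state machine with an index/slice/filter pipeline: find the marker index, slice the tail, compute a stop index from the first terminating header, and filter the sliced region.
import Mathlib
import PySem

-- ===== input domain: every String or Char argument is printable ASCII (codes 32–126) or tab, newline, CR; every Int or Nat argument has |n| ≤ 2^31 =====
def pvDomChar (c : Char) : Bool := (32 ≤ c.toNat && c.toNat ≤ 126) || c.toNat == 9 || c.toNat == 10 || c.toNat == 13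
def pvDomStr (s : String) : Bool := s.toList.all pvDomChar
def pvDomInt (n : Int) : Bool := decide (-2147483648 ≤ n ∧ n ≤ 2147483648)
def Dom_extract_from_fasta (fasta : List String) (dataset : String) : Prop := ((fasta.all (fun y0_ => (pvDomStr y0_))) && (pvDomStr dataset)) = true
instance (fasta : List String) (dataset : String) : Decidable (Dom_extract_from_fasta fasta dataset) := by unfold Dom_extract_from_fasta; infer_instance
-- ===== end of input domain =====

-- B replaces A's boolean-flag state machine with an index/slice/filter pipeline
-- (marker index, tail slice, stop index, filter); objective: alternative.

-- ===== PORT A =====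
-- A's single loop carrying the 'read' flag and the accumulator.
def pvLoopA (dataset : String) : List String → Bool → List String → List String
  | [], _, acc => acc
  | line :: rest, read, acc =>
    if PySem.Str.isIn dataset line then
      pvLoopA dataset rest true acc
    else if read then
      if PySem.Str.isIn ">" line then
        if PySem.Str.isIn "instances" line then
          pvLoopA dataset rest read acc
        else
          acc  -- return binding_sites
      else
        pvLoopA dataset rest read (acc ++ [line])
    else
      pvLoopA dataset rest read acc

def extract_from_fasta (fasta : List String) (dataset : String) : List String :=
  pvLoopA dataset fasta false []

-- ===== PORT B =====
-- stop predicate: a terminating header line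
def pvStopP (dataset : String) (line : String) : Bool :=
  PySem.Str.isIn ">" line && !PySem.Str.isIn dataset line && !PySem.Str.isIn "instances" line
-- keep predicate for the final filter
def pvKeepP (dataset : String) (line : String) : Bool :=
  !PySem.Str.isIn dataset line && !PySem.Str.isIn ">" line

def extract_from_fasta_alt (fasta : List String) (dataset : String) : List String :=
  match fasta.findIdx? (fun line => PySem.Str.isIn dataset line) with
  | none => []
  | some start =>
    let tail := fasta.drop (start + 1)
    let stop := (tail.findIdx? (pvStopP dataset)).getD tail.length
    (tail.take stop).filter (pvKeepP dataset)

-- ===== PRECONDITION & SPEC =====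
def Spec_extract_from_fasta (fasta : List String) (dataset : String) (out : List String) : Prop := out = extract_from_fasta_alt fasta dataset
instance (fasta : List String) (dataset : String) (out : List String) : Decidable (Spec_extract_from_fasta fasta dataset out) := by unfold Spec_extract_from_fasta; infer_instance

-- ===== CLAIM =====
def Claim_equal_extract_from_fasta : Prop := ∀ (fasta : List String) (dataset : String), Dom_extract_from_fasta fasta dataset → Spec_extract_from_fasta fasta dataset (extract_from_fasta fasta dataset)

-- ===== LEMMAS AND PROOFS =====

-- What B computes on a tail: take up to the stop index, then filter.
def pvCollectB (dataset : String) (ls : List String) : List String :=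
  (ls.take ((ls.findIdx? (pvStopP dataset)).getD ls.length)).filter (pvKeepP dataset)

theorem pvCollectB_cons (dataset : String) (l : String) (rest : List String) :
    pvCollectB dataset (l :: rest) =
      if pvStopP dataset l then []
      else (if pvKeepP dataset l then [l] else []) ++ pvCollectB dataset rest := by
  unfold pvCollectB
  rw [List.findIdx?_cons]
  by_cases h : pvStopP dataset l
  · simp [h]
  · simp only [h, Bool.false_eq_true, if_false]
    cases hf : rest.findIdx? (pvStopP dataset) with
    | none =>
      simp only [Option.map_none, Option.getD_none, List.length_cons,
        List.take_succ_cons, List.filter_cons]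
      split_ifs <;> simp [List.take_length]
    | some j =>
      simp only [Option.map_some, Option.getD_some, List.take_succ_cons, List.filter_cons]
      split_ifs <;> simp

-- After the flag is set, A's loop appends exactly what B collects from the tail.
theorem pvLoopA_true (dataset : String) (ls : List String) (acc : List String) :
    pvLoopA dataset ls true acc = acc ++ pvCollectB dataset ls := by
  induction ls generalizing acc with
  | nil => simp [pvLoopA, pvCollectB]
  | cons l rest ih =>
    rw [pvCollectB_cons]
    simp only [pvLoopA, PySem.Str.isIn]
    by_cases h1 : PySem.Chars.isIn dataset.toList l.toList
    · have hs : pvStopP dataset l = false := by simp [pvStopP, PySem.Str.isIn, h1]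
      have hk : pvKeepP dataset l = false := by simp [pvKeepP, PySem.Str.isIn, h1]
      simp [h1, hs, hk, ih]
    · by_cases h2 : PySem.Chars.isIn ['>'] l.toList
      · by_cases h3 : PySem.Chars.isIn ['i', 'n', 's', 't', 'a', 'n', 'c', 'e', 's'] l.toList
        · have hs : pvStopP dataset l = false := by simp [pvStopP, PySem.Str.isIn, h3]
          have hk : pvKeepP dataset l = false := by simp [pvKeepP, PySem.Str.isIn, h2]
          simp [h1, h2, h3, hs, hk, ih]
        · have hs : pvStopP dataset l = true := by
            simp [pvStopP, PySem.Str.isIn, h1, h2, h3]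
          simp [h1, h2, h3, hs]
      · have hs : pvStopP dataset l = false := by simp [pvStopP, PySem.Str.isIn, h2]
        have hk : pvKeepP dataset l = true := by simp [pvKeepP, PySem.Str.isIn, h1, h2]
        simp [h1, h2, hs, hk, ih]

-- Before the flag is set, A's loop is the marker search followed by the collect.
theorem pvLoopA_false (dataset : String) (ls : List String) :
    pvLoopA dataset ls false [] =
      (match ls.findIdx? (fun line => PySem.Str.isIn dataset line) with
       | none => []
       | some start => pvCollectB dataset (ls.drop (start + 1))) := by
  induction ls with
  | nil => simp [pvLoopA]
  | cons l rest ih =>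
    rw [List.findIdx?_cons]
    by_cases h1 : PySem.Str.isIn dataset l
    · simp only [pvLoopA, h1, if_true, List.drop_succ_cons, List.drop_zero]
      simpa using pvLoopA_true dataset rest []
    · simp only [pvLoopA, h1, Bool.false_eq_true, if_false]
      rw [ih]
      cases hf : rest.findIdx? (fun line => PySem.Str.isIn dataset line) <;> simp

-- ===== VERDICT =====
theorem extract_from_fasta_spec : Claim_equal_extract_from_fasta := by
  intro fasta dataset _
  unfold Spec_extract_from_fasta extract_from_fasta extract_from_fasta_alt
  rw [pvLoopA_false]
  cases hf : fasta.findIdx? (fun line => PySem.Str.isIn dataset line) <;> simp [pvCollectB]
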